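-- pv_equiv track=rewrite | github.com/shashank35i/DentraOS | Backend/dental_agents/dental_agents/agents/appointment_agent.py | _pick_enum_value
-- ===== SOURCE A (Python) =====
-- from typing import Any, Dict, Optional, List, Tuple
--
-- def _pick_enum_value(enum_vals: List[str], desired: str) -> Optional[str]:
--     if not desired:
--         return None
--     if not enum_vals:
--         return desired
--     want = desired.strip().lower().replace("_", " ").replace("-", " ")
--     for v in enum_vals:
--         vv = v.strip().lower().replace("_", " ").replace("-", " ")
--         if vv == want:
--             return v
--     want2 = want.replace(" ", "")
--     for v in enum_vals:
--         vv2 = v.strip().lower().replace("_", " ").replace("-", " ").replace(" ", "")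
--         if vv2 == want2:
--             return v
--     return None
-- ===== SOURCE B (Python) =====
-- def _pick_enum_value(enum_vals, desired):
--     if not desired:
--         return None
--     if not enum_vals:
--         return desired
--     want = desired.strip().lower().replace("_", " ").replace("-", " ")
--     want2 = want.replace(" ", "")
--     found = False
--     fallback = None
--     for v in enum_vals:
--         vv = v.strip().lower().replace("_", " ").replace("-", " ")
--         if vv == want:
--             return v
--         if not found and vv.replace(" ", "") == want2:
--             found = True
--             fallback = v
--     return fallback if found else None
-- ===== Notes on version B (the rewrite author's own statement) =====
-- stated objective: alternative
-- what changed: Replaces A's two sequential scans (exact-normalized pass, then loose no-spaces pass) with a single pass that returns immediately on an exact match and records the first loose match in an explicit found-flag/fallback pair.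
import Mathlib
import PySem

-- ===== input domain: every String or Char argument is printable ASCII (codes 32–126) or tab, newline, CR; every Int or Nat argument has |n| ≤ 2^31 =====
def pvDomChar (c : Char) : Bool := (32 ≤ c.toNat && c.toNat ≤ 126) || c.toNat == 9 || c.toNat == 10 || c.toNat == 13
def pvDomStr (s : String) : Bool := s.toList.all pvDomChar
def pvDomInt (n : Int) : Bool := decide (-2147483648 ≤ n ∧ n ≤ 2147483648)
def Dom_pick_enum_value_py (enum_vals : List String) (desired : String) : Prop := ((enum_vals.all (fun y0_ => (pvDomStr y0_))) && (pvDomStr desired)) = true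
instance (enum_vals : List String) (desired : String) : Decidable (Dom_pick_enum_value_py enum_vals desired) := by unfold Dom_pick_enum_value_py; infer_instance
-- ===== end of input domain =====

-- B folds A's two scans into one pass with an explicit found-flag/fallback pair (alternative decomposition, same cost).

-- ===== PORT A =====
-- v.strip().lower().replace("_", " ").replace("-", " ")
def pvNormA (v : String) : String :=
  PySem.Str.replace (PySem.Str.replace (PySem.Str.lower (PySem.Str.strip v)) "_" " ") "-" " "

-- A's first loop: first v with normalized form equal to want
def pvFindExact (l : List String) (want : String) : Option String :=
  match l with
  | [] => none
  | v :: rest => if pvNormA v = want then some v else pvFindExact rest want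

-- A's second loop: first v whose normalized form with spaces removed equals want2
def pvFindLoose (l : List String) (want2 : String) : Option String :=
  match l with
  | [] => none
  | v :: rest =>
      if PySem.Str.replace (pvNormA v) " " "" = want2 then some v
      else pvFindLoose rest want2

def pick_enum_value_py (enum_vals : List String) (desired : String) : Option String :=
  if desired = "" then none
  else if enum_vals = [] then some desired
  else
    let want := pvNormA desired
    match pvFindExact enum_vals want with
    | some v => some v
    | none => pvFindLoose enum_vals (PySem.Str.replace want " " "")

-- ===== PORT B =====
-- B's single loop: return on exact match, record first loose match in (found, fallback)
def pvLoopB (l : List String) (want want2 : String) (found : Bool) (fallback : Option String) : Option String :=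
  match l with
  | [] => if found then fallback else none
  | v :: rest =>
      let vv := pvNormA v
      if vv = want then some v
      else if !found && PySem.Str.replace vv " " "" = want2 then
        pvLoopB rest want want2 true (some v)
      else pvLoopB rest want want2 found fallback

def pick_enum_value_py_alt (enum_vals : List String) (desired : String) : Option String :=
  if desired = "" then none
  else if enum_vals = [] then some desired
  else
    let want := pvNormA desired
    let want2 := PySem.Str.replace want " " ""
    pvLoopB enum_vals want want2 false none

-- ===== PRECONDITION & SPEC =====
def Spec_pick_enum_value_py (enum_vals : List String) (desired : String) (out : Option String) : Prop := out = pick_enum_value_py_alt enum_vals desired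
instance (enum_vals : List String) (desired : String) (out : Option String) : Decidable (Spec_pick_enum_value_py enum_vals desired out) := by unfold Spec_pick_enum_value_py; infer_instance

-- ===== CLAIM (what is proved, stated in full; the proofs are below) =====
def Claim_equal_pick_enum_value_py : Prop := ∀ (enum_vals : List String) (desired : String), Dom_pick_enum_value_py enum_vals desired → Spec_pick_enum_value_py enum_vals desired (pick_enum_value_py enum_vals desired)

-- ===== LEMMAS AND PROOFS =====
-- B's single pass computes: the first exact match if any; otherwise the recorded
-- fallback if one was already found; otherwise A's second (loose) scan.
theorem pvLoopB_eq (l : List String) (want want2 : String) (found : Bool) (fb : Option String) :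
    pvLoopB l want want2 found fb =
      match pvFindExact l want with
      | some v => some v
      | none => if found then fb else pvFindLoose l want2 := by
  induction l generalizing found fb with
  | nil => rfl
  | cons v rest ih =>
      simp only [pvLoopB, pvFindExact, pvFindLoose]
      by_cases h1 : pvNormA v = want
      · simp [h1]
      · by_cases h2 : PySem.Str.replace (pvNormA v) " " "" = want2
        · cases found <;> simp [h1, h2, ih]
        · cases found <;> simp [h1, h2, ih]

-- ===== VERDICT (by name: the statement is the Claim_ definition above) =====
theorem pick_enum_value_py_spec : Claim_equal_pick_enum_value_py := by
  intro enum_vals desired _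
  unfold Spec_pick_enum_value_py pick_enum_value_py pick_enum_value_py_alt
  by_cases hd : desired = ""
  · simp [hd]
  · by_cases he : enum_vals = []
    · simp [hd, he]
    · simp only [hd, he, if_false, pvLoopB_eq]
      cases pvFindExact enum_vals (pvNormA desired) <;> simp
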